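-- pv_equiv track=rewrite | github.com/umerjillani/Targeted-Leads-Extractor | Scripts/leads_finder_2.0.py | is_location_match
-- ===== SOURCE A (Python) =====
-- country_aliases = {
--     "usa": "United States",
--     "united states": "United States",
--     "u.s.a.": "United States",
--     "us": "United States",
--     "america": "United States",
--     "canada": "Canada",
--     "ca": "Canada",
--     "can": "Canada",
--     "mexico": "Mexico",
--     "mx": "Mexico",
--     "mex": "Mexico",
--     "belize": "Belize",
--     "bz": "Belize",
--     "guatemala": "Guatemala",
--     "gt": "Guatemala",
--     "honduras": "Honduras",
--     "hn": "Honduras",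
--     "nicaragua": "Nicaragua",
--     "ni": "Nicaragua",
--     "costa rica": "Costa Rica",
--     "cr": "Costa Rica",
--     "panama": "Panama",
--     "pa": "Panama"
-- }
--
-- def normalize_country(country):
--     """Normalize country name using aliases."""
--     country = country.strip().lower()
--     return country_aliases.get(country, country.title())
--
-- def is_location_match(location_str, state, code, country):
--     location_str = location_str.lower().strip()
--     state_lower = state.lower()
--     code_lower = code.lower()
--     country_normalized = normalize_country(country).lower()
--
--     if state_lower == location_str or code_lower == location_str:
--         return True
--
--     # Normalize country in location string
--     location_parts = [normalize_country(part) if part in country_aliases else part for part in location_str.split(",")]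
--     normalized_location = ", ".join(location_parts).lower()
--
--     state_match = (
--         f" {state_lower}," in f" {normalized_location}," or
--         f" {state_lower} " in f" {normalized_location} " or
--         f", {state_lower}," in f", {normalized_location}," or
--         f", {state_lower} " in f", {normalized_location} " or
--         normalized_location.endswith(f" {state_lower}") or
--         normalized_location.endswith(f", {state_lower}")
--     )
--
--     code_match = (
--         f" {code_lower}," in f" {normalized_location}," or
--         f" {code_lower} " in f" {normalized_location} " or
--         f", {code_lower}," in f", {normalized_location}," or
--         f", {code_lower} " in f", {normalized_location} " or
--         normalized_location.endswith(f" {code_lower}") or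
--         normalized_location.endswith(f", {code_lower}")
--     )
--
--     country_match = (
--         f" {country_normalized}," in f" {normalized_location}," or
--         f" {country_normalized} " in f" {normalized_location} " or
--         f", {country_normalized}," in f", {normalized_location}," or
--         f", {country_normalized} " in f", {normalized_location} " or
--         normalized_location.endswith(f" {country_normalized}") or
--         normalized_location.endswith(f", {country_normalized}")
--     )
--
--     if (state_match or code_match) and (country_match or "," not in normalized_location):
--         return True
--
--     return False
-- ===== SOURCE B (Python) =====
-- country_aliases = {
--     "usa": "United States",
--     "united states": "United States",
--     "u.s.a.": "United States",
--     "us": "United States",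
--     "america": "United States",
--     "canada": "Canada",
--     "ca": "Canada",
--     "can": "Canada",
--     "mexico": "Mexico",
--     "mx": "Mexico",
--     "mex": "Mexico",
--     "belize": "Belize",
--     "bz": "Belize",
--     "guatemala": "Guatemala",
--     "gt": "Guatemala",
--     "honduras": "Honduras",
--     "hn": "Honduras",
--     "nicaragua": "Nicaragua",
--     "ni": "Nicaragua",
--     "costa rica": "Costa Rica",
--     "cr": "Costa Rica",
--     "panama": "Panama",
--     "pa": "Panama"
-- }
--
-- def normalize_country(country):
--     """Normalize country name using aliases."""
--     country = country.strip().lower()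
--     return country_aliases.get(country, country.title())
--
-- def _here(tok, s):
--     """Does s start with tok, followed by end-of-string, space or comma?"""
--     return s.startswith(tok) and (len(s) == len(tok) or s[len(tok)] in ' ,')
--
-- def _word_match(tok, s):
--     """Is tok present in s bounded by start-of-string/space on the left
--     and end-of-string/space/comma on the right?"""
--     if _here(tok, s):
--         return True
--     for i in range(len(s)):
--         if s[i] == ' ' and _here(tok, s[i + 1:]):
--             return True
--     return False
--
-- def is_location_match(location_str, state, code, country):
--     location_str = location_str.lower().strip()
--     state_lower = state.lower()
--     code_lower = code.lower()
--     country_normalized = normalize_country(country).lower()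
--
--     if state_lower == location_str or code_lower == location_str:
--         return True
--
--     location_parts = [normalize_country(part) if part in country_aliases else part for part in location_str.split(",")]
--     normalized_location = ", ".join(location_parts).lower()
--
--     state_match = _word_match(state_lower, normalized_location)
--     code_match = _word_match(code_lower, normalized_location)
--     country_match = _word_match(country_normalized, normalized_location)
--
--     return (state_match or code_match) and (country_match or "," not in normalized_location)
-- ===== Notes on version B (the rewrite author's own statement) =====
-- stated objective: simpler
-- what changed: Each of A's three six-condition OR-blocks of padded substring/endswith tests is replaced by one positional word-boundary scan (_word_match: token preceded by start-of-string or a space and followed by end-of-string, space or comma); the normalisation pipeline, early exact-match return and final combination are unchanged.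
import Mathlib
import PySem

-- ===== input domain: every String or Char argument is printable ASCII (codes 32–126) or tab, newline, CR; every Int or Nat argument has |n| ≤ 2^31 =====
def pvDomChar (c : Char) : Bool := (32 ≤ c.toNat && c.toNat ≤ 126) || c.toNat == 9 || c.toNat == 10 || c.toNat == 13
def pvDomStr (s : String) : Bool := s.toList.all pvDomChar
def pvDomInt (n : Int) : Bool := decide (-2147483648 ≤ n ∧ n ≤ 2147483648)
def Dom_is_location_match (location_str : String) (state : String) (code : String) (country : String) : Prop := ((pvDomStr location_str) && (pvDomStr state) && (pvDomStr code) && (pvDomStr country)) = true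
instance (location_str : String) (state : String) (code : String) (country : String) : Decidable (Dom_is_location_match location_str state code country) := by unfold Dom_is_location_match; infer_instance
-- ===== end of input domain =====

-- B replaces each of A's three six-way substring/endswith OR-blocks by a single positional
-- word-boundary scan (simpler); the normalisation pipeline and final combination are unchanged.

-- ===== PORT A =====
-- the module-level country_aliases dict (shared verbatim by Source B)
def countryAliases : PySem.Dict (List Char) (List Char) := PySem.Dict.ofList
  [ ("usa".toList, "United States".toList)
  , ("united states".toList, "United States".toList)
  , ("u.s.a.".toList, "United States".toList)
  , ("us".toList, "United States".toList)
  , ("america".toList, "United States".toList)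
  , ("canada".toList, "Canada".toList)
  , ("ca".toList, "Canada".toList)
  , ("can".toList, "Canada".toList)
  , ("mexico".toList, "Mexico".toList)
  , ("mx".toList, "Mexico".toList)
  , ("mex".toList, "Mexico".toList)
  , ("belize".toList, "Belize".toList)
  , ("bz".toList, "Belize".toList)
  , ("guatemala".toList, "Guatemala".toList)
  , ("gt".toList, "Guatemala".toList)
  , ("honduras".toList, "Honduras".toList)
  , ("hn".toList, "Honduras".toList)
  , ("nicaragua".toList, "Nicaragua".toList)
  , ("ni".toList, "Nicaragua".toList)
  , ("costa rica".toList, "Costa Rica".toList)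
  , ("cr".toList, "Costa Rica".toList)
  , ("panama".toList, "Panama".toList)
  , ("pa".toList, "Panama".toList) ]

-- hand port of Python str.title(): exact on the ASCII domain, where the cased
-- characters are exactly a-z/A-Z (= Chars.isalpha)
def pyTitleGo : Bool → List Char → List Char
  | _, [] => []
  | prevCased, c :: rest =>
      (if PySem.Chars.isalpha c then
        (if prevCased then PySem.Chars.lowerChar c else PySem.Chars.upperChar c)
       else c) :: pyTitleGo (PySem.Chars.isalpha c) rest

def pyTitle (s : List Char) : List Char := pyTitleGo false s

-- normalize_country (shared verbatim by Source B)
def normalizeCountry (country : List Char) : List Char :=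
  let c := PySem.Chars.lower (PySem.Chars.strip country)
  countryAliases.getD c (pyTitle c)

-- the six-condition OR-block A writes out three times (for state/code/country)
def matchBlock (t L : List Char) : Bool :=
  PySem.Chars.isIn (' ' :: t ++ [',']) (' ' :: L ++ [','])
  || PySem.Chars.isIn (' ' :: t ++ [' ']) (' ' :: L ++ [' '])
  || PySem.Chars.isIn (',' :: ' ' :: t ++ [',']) (',' :: ' ' :: L ++ [','])
  || PySem.Chars.isIn (',' :: ' ' :: t ++ [' ']) (',' :: ' ' :: L ++ [' '])
  || PySem.Chars.endswith L (' ' :: t)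
  || PySem.Chars.endswith L (',' :: ' ' :: t)

def is_location_match (location_str : String) (state : String) (code : String) (country : String) : Bool :=
  let loc := PySem.Chars.strip (PySem.Chars.lower location_str.toList)
  let stateLower := PySem.Chars.lower state.toList
  let codeLower := PySem.Chars.lower code.toList
  let countryNormalized := PySem.Chars.lower (normalizeCountry country.toList)
  if stateLower == loc || codeLower == loc then true
  else
    let locationParts := (PySem.Chars.splitOn loc [',']).map
      (fun part => if countryAliases.contains part then normalizeCountry part else part)
    let normalizedLocation := PySem.Chars.lower (PySem.Chars.join [',', ' '] locationParts)
    let stateMatch := matchBlock stateLower normalizedLocation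
    let codeMatch := matchBlock codeLower normalizedLocation
    let countryMatch := matchBlock countryNormalized normalizedLocation
    if (stateMatch || codeMatch) && (countryMatch || !PySem.Chars.isIn [','] normalizedLocation) then true
    else false

-- ===== PORT B =====
-- _here(tok, s): right-boundary check of the remainder after tok
def rbChk : List Char → Bool
  | [] => true
  | c :: _ => c == ' ' || c == ','

def hereOk (tok s : List Char) : Bool :=
  PySem.Chars.startswith s tok && rbChk (s.drop tok.length)

-- the 'for i in range(len(s))' loop of _word_match: try every position after a space
def scanB (tok : List Char) : List Char → Bool
  | [] => false
  | c :: rest => (c == ' ' && hereOk tok rest) || scanB tok rest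

-- _word_match(tok, s)
def wordMatch (tok s : List Char) : Bool := hereOk tok s || scanB tok s

def is_location_match_alt (location_str : String) (state : String) (code : String) (country : String) : Bool :=
  let loc := PySem.Chars.strip (PySem.Chars.lower location_str.toList)
  let stateLower := PySem.Chars.lower state.toList
  let codeLower := PySem.Chars.lower code.toList
  let countryNormalized := PySem.Chars.lower (normalizeCountry country.toList)
  if stateLower == loc || codeLower == loc then true
  else
    let locationParts := (PySem.Chars.splitOn loc [',']).map
      (fun part => if countryAliases.contains part then normalizeCountry part else part)
    let normalizedLocation := PySem.Chars.lower (PySem.Chars.join [',', ' '] locationParts)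
    let stateMatch := wordMatch stateLower normalizedLocation
    let codeMatch := wordMatch codeLower normalizedLocation
    let countryMatch := wordMatch countryNormalized normalizedLocation
    (stateMatch || codeMatch) && (countryMatch || !PySem.Chars.isIn [','] normalizedLocation)

-- ===== PRECONDITION & SPEC =====
def Spec_is_location_match (location_str : String) (state : String) (code : String) (country : String) (out : Bool) : Prop := out = is_location_match_alt location_str state code country
instance (location_str : String) (state : String) (code : String) (country : String) (out : Bool) : Decidable (Spec_is_location_match location_str state code country out) := by unfold Spec_is_location_match; infer_instance

-- ===== CLAIM (what is proved, stated in full; the proofs are below) =====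
def Claim_equal_is_location_match : Prop := ∀ (location_str : String) (state : String) (code : String) (country : String), Dom_is_location_match location_str state code country → Spec_is_location_match location_str state code country (is_location_match location_str state code country)

-- ===== LEMMAS AND PROOFS =====

-- tok occurs in L with start-of-string/space on its left and end/space/comma on its right
def Occ (tok L : List Char) : Prop :=
  ∃ pre post, L = pre ++ tok ++ post ∧
    (pre = [] ∨ ∃ p, pre = p ++ [' ']) ∧
    (post = [] ∨ ∃ c q, post = c :: q ∧ (c = ' ' ∨ c = ','))

theorem hereOk_iff (tok s : List Char) : hereOk tok s = true ↔
    ∃ post, s = tok ++ post ∧ (post = [] ∨ ∃ c q, post = c :: q ∧ (c = ' ' ∨ c = ',')) := by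
  unfold hereOk
  rw [Bool.and_eq_true, PySem.Chars.startswith_iff]
  constructor
  · rintro ⟨⟨post, rfl⟩, h2⟩
    refine ⟨post, rfl, ?_⟩
    rw [List.drop_left] at h2
    cases post with
    | nil => exact Or.inl rfl
    | cons c q =>
        refine Or.inr ⟨c, q, rfl, ?_⟩
        simpa [rbChk] using h2
  · rintro ⟨post, rfl, hrb⟩
    refine ⟨⟨post, rfl⟩, ?_⟩
    rw [List.drop_left]
    rcases hrb with rfl | ⟨c, q, rfl, hc⟩
    · rfl
    · rcases hc with rfl | rfl <;> simp [rbChk]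

theorem scanB_iff (tok s : List Char) : scanB tok s = true ↔
    ∃ a rest, s = a ++ ' ' :: rest ∧ hereOk tok rest = true := by
  induction s with
  | nil =>
      constructor
      · intro h; simp [scanB] at h
      · rintro ⟨a, rest, h, -⟩; cases a <;> simp at h
  | cons c s ih =>
      simp only [scanB, Bool.or_eq_true, Bool.and_eq_true, beq_iff_eq, ih]
      constructor
      · rintro (⟨rfl, hh⟩ | ⟨a, rest, rfl, hh⟩)
        · exact ⟨[], s, rfl, hh⟩
        · exact ⟨c :: a, rest, rfl, hh⟩
      · rintro ⟨a, rest, h, hh⟩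
        cases a with
        | nil =>
            obtain ⟨rfl, rfl⟩ : c = ' ' ∧ s = rest := by simpa using h
            exact Or.inl ⟨rfl, hh⟩
        | cons b a =>
            obtain ⟨rfl, rfl⟩ : c = b ∧ s = a ++ ' ' :: rest := by simpa using h
            exact Or.inr ⟨a, rest, rfl, hh⟩

theorem wordMatch_iff (tok L : List Char) : wordMatch tok L = true ↔ Occ tok L := by
  unfold wordMatch Occ
  rw [Bool.or_eq_true, hereOk_iff, scanB_iff]
  constructor
  · rintro (⟨post, rfl, hrb⟩ | ⟨a, rest, rfl, hh⟩)
    · exact ⟨[], post, rfl, Or.inl rfl, hrb⟩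
    · obtain ⟨post, rfl, hrb⟩ := (hereOk_iff tok rest).mp hh
      exact ⟨a ++ [' '], post, by simp, Or.inr ⟨a, rfl⟩, hrb⟩
  · rintro ⟨pre, post, rfl, hlb, hrb⟩
    rcases hlb with rfl | ⟨p, rfl⟩
    · exact Or.inl ⟨post, rfl, hrb⟩
    · exact Or.inr ⟨p, tok ++ post, by simp, (hereOk_iff tok _).mpr ⟨post, rfl, hrb⟩⟩

-- the padded-substring tests " t·" in " L·" (· = d), characterised positionally
theorem pad_iff (t L : List Char) (d : Char) :
    (' ' :: t ++ [d]) <:+: (' ' :: L ++ [d]) ↔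
      ∃ pre post, L = pre ++ t ++ post ∧
        (pre = [] ∨ ∃ p, pre = p ++ [' ']) ∧
        (post = [] ∨ ∃ q, post = d :: q) := by
  constructor
  · rintro ⟨u, v, huv⟩
    rcases v.eq_nil_or_concat with rfl | ⟨w, x, rfl⟩
    · have h : u ++ (' ' :: t) = ' ' :: L := by
        have h0 : (u ++ (' ' :: t)) ++ [d] = (' ' :: L) ++ [d] := by
          simpa using huv
        exact (List.append_inj' h0 rfl).1
      cases u with
      | nil =>
          obtain rfl : t = L := by simpa using h
          exact ⟨[], [], by simp, Or.inl rfl, Or.inl rfl⟩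
      | cons c u' =>
          obtain ⟨rfl, rfl⟩ : c = ' ' ∧ L = u' ++ ' ' :: t := by
            have := h
            simp only [List.cons_append, List.cons.injEq] at this
            exact ⟨this.1, this.2.symm⟩
          exact ⟨u' ++ [' '], [], by simp, Or.inr ⟨u', rfl⟩, Or.inl rfl⟩
    · have h0 : (u ++ (' ' :: t) ++ (d :: w)) ++ [x] = (' ' :: L) ++ [d] := by
        simpa using huv
      have h1 := List.append_inj' h0 rfl
      have h : u ++ (' ' :: t) ++ (d :: w) = ' ' :: L := h1.1
      cases u with
      | nil =>
          obtain rfl : L = t ++ d :: w := by simpa using h.symm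
          exact ⟨[], d :: w, by simp, Or.inl rfl, Or.inr ⟨w, rfl⟩⟩
      | cons c u' =>
          obtain ⟨rfl, hL⟩ : c = ' ' ∧ u' ++ ' ' :: t ++ d :: w = L := by
            simpa using h
          exact ⟨u' ++ [' '], d :: w, by simp [← hL], Or.inr ⟨u', rfl⟩, Or.inr ⟨w, rfl⟩⟩
  · rintro ⟨pre, post, rfl, hlb, hrb⟩
    rcases hlb with rfl | ⟨p, rfl⟩ <;> rcases hrb with rfl | ⟨q, rfl⟩
    · exact ⟨[], [], by simp⟩
    · exact ⟨[], q ++ [d], by simp⟩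
    · exact ⟨' ' :: p, [], by simp⟩
    · exact ⟨' ' :: p, q ++ [d], by simp⟩

theorem matchBlock_iff (t L : List Char) : matchBlock t L = true ↔ Occ t L := by
  unfold matchBlock
  simp only [Bool.or_eq_true, PySem.Chars.isIn_iff_infix, PySem.Chars.endswith_iff]
  constructor
  · have strip : ∀ (d : Char) (X : List Char),
        (' ' :: t ++ [d]) <:+: (',' :: X) → (' ' :: t ++ [d]) <:+: X := by
      intro d X hx
      rcases hx with ⟨u, v, huv⟩
      cases u with
      | nil => simp at huv
      | cons c u' =>
          obtain ⟨-, h2⟩ : c = ',' ∧ u' ++ (' ' :: t ++ [d]) ++ v = X := by simpa using huv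
          exact ⟨u', v, h2⟩
    have sub : ∀ (d : Char) (X : List Char),
        (',' :: ' ' :: t ++ [d]) <:+: X → (' ' :: t ++ [d]) <:+: X := by
      intro d X hx
      exact List.IsInfix.trans ⟨[','], [], by simp⟩ hx
    have toOcc : ∀ (d : Char), d = ' ' ∨ d = ',' →
        (' ' :: t ++ [d]) <:+: (' ' :: L ++ [d]) → Occ t L := by
      intro d hd h
      obtain ⟨pre, post, rfl, hlb, hrb⟩ := (pad_iff t L d).mp h
      refine ⟨pre, post, rfl, hlb, ?_⟩
      rcases hrb with rfl | ⟨q, rfl⟩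
      · exact Or.inl rfl
      · exact Or.inr ⟨d, q, rfl, hd⟩
    rintro (((((h | h) | h) | h) | h) | h)
    · exact toOcc ',' (Or.inr rfl) h
    · exact toOcc ' ' (Or.inl rfl) h
    · exact toOcc ',' (Or.inr rfl) (strip ',' _ (sub ',' _ h))
    · exact toOcc ' ' (Or.inl rfl) (strip ' ' _ (sub ' ' _ h))
    · obtain ⟨X, hX⟩ := h
      exact ⟨X ++ [' '], [], by simp [← hX], Or.inr ⟨X, rfl⟩, Or.inl rfl⟩
    · obtain ⟨X, hX⟩ := h
      exact ⟨(X ++ [',']) ++ [' '], [], by simp [← hX], Or.inr ⟨X ++ [','], rfl⟩, Or.inl rfl⟩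
  · rintro ⟨pre, post, rfl, hlb, hrb⟩
    have mk : ∀ (d : Char), (post = [] ∨ ∃ q, post = d :: q) →
        (' ' :: t ++ [d]) <:+: (' ' :: (pre ++ t ++ post) ++ [d]) :=
      fun d hp => (pad_iff t _ d).mpr ⟨pre, post, rfl, hlb, hp⟩
    rcases hrb with rfl | ⟨c, q, rfl, hc⟩
    · exact Or.inl (Or.inl (Or.inl (Or.inl (Or.inl (mk ',' (Or.inl rfl))))))
    · rcases hc with rfl | rfl
      · exact Or.inl (Or.inl (Or.inl (Or.inl (Or.inr (mk ' ' (Or.inr ⟨q, rfl⟩))))))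
      · exact Or.inl (Or.inl (Or.inl (Or.inl (Or.inl (mk ',' (Or.inr ⟨q, rfl⟩))))))

theorem matchBlock_eq_wordMatch (t L : List Char) : matchBlock t L = wordMatch t L := by
  rw [Bool.eq_iff_iff, matchBlock_iff, wordMatch_iff]

-- ===== VERDICT (by name: the statement is the Claim_ definition above) =====
theorem is_location_match_spec : Claim_equal_is_location_match := by
  intro location_str state code country _
  unfold Spec_is_location_match is_location_match is_location_match_alt
  simp only [matchBlock_eq_wordMatch]
  split <;> simp
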